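-- pv_equiv track=rewrite | github.com/VuBui217/dailycodingchallenge | 2025/october/missing_socks.py | sock_pairs
-- ===== SOURCE A (Python) =====
-- def sock_pairs(pairs, cycles):
--     num_of_socks = 2*pairs
--     for i in range(1,cycles+1):
--         if i % 2 == 0:
--             num_of_socks-=1
--         if i % 3 == 0:
--             num_of_socks+=1
--         if i % 5 == 0:
--             num_of_socks-=1
--         if i % 10 == 0:
--             num_of_socks+=2
--
--         num_of_socks=max(num_of_socks,0)
--
--     return num_of_socks//2
-- ===== SOURCE B (Python) =====
-- def sock_pairs(pairs, cycles):
--     # D(n) = net (unclamped) change after n cycles; period 30 with D(k+30) = D(k) - 5,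
--     # so the running minimum of D over [1, n] is attained in the last 30 indices,
--     # and the clamped walk equals max(start + D(n), D(n) - min D) -- O(1) instead of O(cycles).
--     def D(n):
--         return -(n // 2) + n // 3 - n // 5 + 2 * (n // 10)
--     start = 2 * pairs
--     if cycles <= 0:
--         return start // 2
--     n = cycles
--     best = 0  # k = n contributes D(n) - D(n) = 0
--     for k in range(max(1, n - 29), n):
--         best = max(best, D(n) - D(k))
--     return max(start + D(n), best) // 2
-- ===== Notes on version B (the rewrite author's own statement) =====
-- stated objective: faster
-- what changed: Replaces A's O(cycles) cycle-by-cycle clamped simulation by an O(1) closed form: the net change D(n) is computed directly from floor divisions, and since D has period 30 (D(k+30)=D(k)-5) the clamp's effect equals the maximum of D(n)-D(k) over only the last 30 indices k, so the answer is max(2*pairs + D(n), max_k (D(n)-D(k))) // 2.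
import Mathlib
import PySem

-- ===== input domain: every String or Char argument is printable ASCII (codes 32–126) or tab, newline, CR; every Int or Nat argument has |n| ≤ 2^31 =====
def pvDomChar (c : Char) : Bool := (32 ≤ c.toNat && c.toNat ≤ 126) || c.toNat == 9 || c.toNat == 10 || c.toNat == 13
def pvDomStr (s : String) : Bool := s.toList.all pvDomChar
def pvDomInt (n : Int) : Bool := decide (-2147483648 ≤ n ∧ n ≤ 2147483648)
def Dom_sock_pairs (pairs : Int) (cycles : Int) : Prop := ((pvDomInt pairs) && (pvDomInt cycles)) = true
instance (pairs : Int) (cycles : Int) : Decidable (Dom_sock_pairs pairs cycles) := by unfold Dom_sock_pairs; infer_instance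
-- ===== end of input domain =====

-- B replaces A's O(cycles) simulation by an O(1) closed form using the period-30 structure
-- of the per-cycle adjustments (objective: faster, asymptotic).


-- ===== PORT A =====
-- one iteration of A's loop body (the four conditional adjustments, then the clamp)
def sockStepA (s i : Int) : Int :=
  let s1 := if PySem.Int.mod i 2 = 0 then s - 1 else s
  let s2 := if PySem.Int.mod i 3 = 0 then s1 + 1 else s1
  let s3 := if PySem.Int.mod i 5 = 0 then s2 - 1 else s2
  let s4 := if PySem.Int.mod i 10 = 0 then s3 + 2 else s3
  max s4 0

def sock_pairs (pairs : Int) (cycles : Int) : Int :=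
  PySem.Int.floordiv ((PySem.List.pyRange 1 (cycles + 1) 1).foldl sockStepA (2 * pairs)) 2

-- ===== PORT B =====
-- B's helper D(n): net unclamped change after n cycles
def sockD (n : Int) : Int :=
  -(PySem.Int.floordiv n 2) + PySem.Int.floordiv n 3 - PySem.Int.floordiv n 5
    + 2 * PySem.Int.floordiv n 10

def sock_pairs_alt (pairs : Int) (cycles : Int) : Int :=
  let start := 2 * pairs
  if cycles ≤ 0 then PySem.Int.floordiv start 2
  else
    let n := cycles
    let best := (PySem.List.pyRange (max 1 (n - 29)) n 1).foldl
      (fun b k => max b (sockD n - sockD k)) 0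
    PySem.Int.floordiv (max (start + sockD n) best) 2

-- ===== PRECONDITION & SPEC =====
def Spec_sock_pairs (pairs : Int) (cycles : Int) (out : Int) : Prop := out = sock_pairs_alt pairs cycles
instance (pairs : Int) (cycles : Int) (out : Int) : Decidable (Spec_sock_pairs pairs cycles out) := by unfold Spec_sock_pairs; infer_instance

-- ===== CLAIM (what is proved, stated in full; the proofs are below) =====
def Claim_equal_sock_pairs : Prop := ∀ (pairs : Int) (cycles : Int), Dom_sock_pairs pairs cycles → Spec_sock_pairs pairs cycles (sock_pairs pairs cycles)

-- ===== LEMMAS AND PROOFS =====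

-- per-cycle delta of A's loop, as a single integer
def dlt (i : Int) : Int :=
  (if i % 2 = 0 then (-1 : Int) else 0) + (if i % 3 = 0 then 1 else 0)
    + (if i % 5 = 0 then -1 else 0) + (if i % 10 = 0 then 2 else 0)

-- prefix sums of dlt: Dn n = dlt 1 + … + dlt n
def Dn : Nat → Int
  | 0 => 0
  | n + 1 => Dn n + dlt ((n : Int) + 1)

-- A's clamped walk
def Wk (s0 : Int) : Nat → Int
  | 0 => s0
  | n + 1 => max (Wk s0 n + dlt ((n : Int) + 1)) 0

-- running max of the clamped zero-start walk
def Mx : Nat → Int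
  | 0 => 0
  | n + 1 => max (Mx n + dlt ((n : Int) + 1)) 0

-- running min of the prefix sums (over k ∈ [0, n])
def mn : Nat → Int
  | 0 => 0
  | n + 1 => min (mn n) (Dn (n + 1))

-- closed form over Lean's ediv (equal to sockD: all divisors are positive)
def En (i : Int) : Int := -(i / 2) + i / 3 - i / 5 + 2 * (i / 10)

lemma sockD_eq (i : Int) : sockD i = En i := by
  unfold sockD En
  rw [PySem.Int.floordiv_eq_ediv_of_pos (by norm_num),
      PySem.Int.floordiv_eq_ediv_of_pos (by norm_num),
      PySem.Int.floordiv_eq_ediv_of_pos (by norm_num),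
      PySem.Int.floordiv_eq_ediv_of_pos (by norm_num)]

lemma stepA_eq (s i : Int) : sockStepA s i = max (s + dlt i) 0 := by
  simp only [sockStepA, dlt]
  rw [PySem.Int.mod_eq_emod_of_pos (by norm_num), PySem.Int.mod_eq_emod_of_pos (by norm_num),
      PySem.Int.mod_eq_emod_of_pos (by norm_num), PySem.Int.mod_eq_emod_of_pos (by norm_num)]
  split_ifs <;> omega

lemma div_succ2 (i : Int) : (i + 1) / 2 = i / 2 + (if (i + 1) % 2 = 0 then 1 else 0) := by
  split_ifs with h <;> omega
lemma div_succ3 (i : Int) : (i + 1) / 3 = i / 3 + (if (i + 1) % 3 = 0 then 1 else 0) := by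
  split_ifs with h <;> omega
lemma div_succ5 (i : Int) : (i + 1) / 5 = i / 5 + (if (i + 1) % 5 = 0 then 1 else 0) := by
  split_ifs with h <;> omega
lemma div_succ10 (i : Int) : (i + 1) / 10 = i / 10 + (if (i + 1) % 10 = 0 then 1 else 0) := by
  split_ifs with h <;> omega

lemma En_succ (i : Int) : En (i + 1) = En i + dlt (i + 1) := by
  unfold En dlt
  rw [div_succ2, div_succ3, div_succ5, div_succ10]
  split_ifs <;> ring

lemma En_cast (n : Nat) : En (n : Int) = Dn n := by
  induction n with
  | zero => simp [En, Dn]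
  | succ m ih =>
    show En ((m + 1 : Nat) : Int) = Dn m + dlt ((m : Int) + 1)
    push_cast
    rw [En_succ, ih]

-- periodicity of the per-cycle delta
lemma dlt_add30 (i : Int) : dlt (i + 30) = dlt i := by
  unfold dlt
  have h2 : (i + 30) % 2 = i % 2 := by omega
  have h3 : (i + 30) % 3 = i % 3 := by omega
  have h5 : (i + 30) % 5 = i % 5 := by omega
  have h10 : (i + 30) % 10 = i % 10 := by omega
  rw [h2, h3, h5, h10]

lemma Dn_add30 (k : Nat) : Dn (k + 30) = Dn k - 5 := by
  induction k with
  | zero => decide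
  | succ m ih =>
    have h : (m + 1 + 30) = (m + 30) + 1 := by omega
    rw [h, Dn, ih, Dn]
    have hc : ((m + 30 : Nat) : Int) + 1 = ((m : Int) + 1) + 30 := by push_cast; ring
    rw [hc, dlt_add30]
    omega

-- A's clamped walk equals max of "never clamped" and the clamped zero-start walk
lemma Wk_eq (s0 : Int) (n : Nat) : Wk s0 (n + 1) = max (s0 + Dn (n + 1)) (Mx (n + 1)) := by
  induction n with
  | zero =>
    have h1 : dlt 1 = 0 := by decide
    simp [Wk, Mx, Dn, h1]
  | succ m ih =>
    have hWk : Wk s0 (m + 1 + 1) = max (Wk s0 (m + 1) + dlt (((m + 1 : Nat) : Int) + 1)) 0 := rfl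
    have hMx : Mx (m + 1 + 1) = max (Mx (m + 1) + dlt (((m + 1 : Nat) : Int) + 1)) 0 := rfl
    have hDn : Dn (m + 1 + 1) = Dn (m + 1) + dlt (((m + 1 : Nat) : Int) + 1) := rfl
    rw [hWk, ih, hMx, hDn]
    omega

-- the running min is a lower bound of every prefix sum …
lemma mn_le (n k : Nat) (h : k ≤ n) : mn n ≤ Dn k := by
  induction n with
  | zero =>
    have hk : k = 0 := by omega
    subst hk; simp [mn, Dn]
  | succ m ih =>
    rw [mn]
    rcases Nat.lt_or_ge k (m + 1) with hk | hk
    · exact le_trans (min_le_left _ _) (ih (by omega))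
    · have hke : k = m + 1 := by omega
      subst hke; exact min_le_right _ _

-- the clamped zero-start walk in terms of the running min of prefix sums
lemma Mx_eq (n : Nat) : Mx n = Dn n - mn n := by
  induction n with
  | zero => simp [Mx, Dn, mn]
  | succ m ih =>
    have hle : mn m ≤ Dn m := mn_le m m (le_refl _)
    rw [Mx, ih, mn, Dn]
    omega

-- … and is attained
lemma mn_attained (n : Nat) : ∃ k ≤ n, mn n = Dn k := by
  induction n with
  | zero => exact ⟨0, le_refl _, rfl⟩
  | succ m ih =>
    obtain ⟨k, hk, he⟩ := ih
    rcases le_total (mn m) (Dn (m + 1)) with h | h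
    · exact ⟨k, by omega, by rw [mn]; omega⟩
    · exact ⟨m + 1, le_refl _, by rw [mn]; omega⟩

-- the min over [0,n] is in fact attained inside the window [max 1 (n-29), n]
lemma mn_attained_window (n : Nat) (hn : 1 ≤ n) :
    ∃ k, max 1 (n - 29) ≤ k ∧ k ≤ n ∧ mn n = Dn k := by
  obtain ⟨k, hk, he⟩ := mn_attained n
  by_cases hw : max 1 (n - 29) ≤ k
  · exact ⟨k, hw, hk, he⟩
  · rcases Nat.eq_zero_or_pos k with hk0 | hkpos
    · -- k = 0: if n ≥ 30 this contradicts Dn 30 < Dn 0; else Dn 1 = Dn 0 attains in window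
      subst hk0
      by_cases h30 : 30 ≤ n
      · exfalso
        have hle := mn_le n 30 h30
        have h0 : Dn 30 = -5 := by decide
        have h1 : Dn 0 = 0 := rfl
        omega
      · refine ⟨1, by omega, hn, ?_⟩
        have h1 : Dn 1 = Dn 0 := by decide
        rw [he, h1]
    · -- 1 ≤ k below the window: then k + 30 ≤ n and Dn (k+30) < mn n, contradiction
      exfalso
      have hkn : k + 30 ≤ n := by omega
      have hle := mn_le n (k + 30) hkn
      rw [Dn_add30 k, ← he] at hle
      omega

-- fold-of-max helpers (specialised to B's loop shape)
lemma foldl_max_le_of (f : Int → Int) (V : Int) :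
    ∀ (l : List Int) (c : Int), c ≤ V → (∀ k ∈ l, f k ≤ V) →
      l.foldl (fun b k => max b (f k)) c ≤ V := by
  intro l
  induction l with
  | nil => intro c hc _; exact hc
  | cons x xs ih =>
    intro c hc h
    exact ih (max c (f x)) (by have := h x (by simp); omega)
      (fun k hk => h k (by simp [hk]))

lemma le_foldl_max_init (f : Int → Int) :
    ∀ (l : List Int) (c : Int), c ≤ l.foldl (fun b k => max b (f k)) c := by
  intro l
  induction l with
  | nil => intro c; exact le_refl _
  | cons x xs ih => intro c; exact le_trans (le_max_left _ _) (ih (max c (f x)))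

lemma le_foldl_max_mem (f : Int → Int) (k : Int) :
    ∀ (l : List Int), k ∈ l → ∀ c : Int, f k ≤ l.foldl (fun b k => max b (f k)) c := by
  intro l
  induction l with
  | nil => intro hk; cases hk
  | cons x xs ih =>
    intro hk c
    rcases List.mem_cons.mp hk with h | h
    · subst h; exact le_trans (le_max_right _ _) (le_foldl_max_init f xs _)
    · exact ih h (max c (f x))

-- B's inner fold computes Dn n - mn n
lemma best_eq (nn : Nat) (hn : 1 ≤ nn) :
    (PySem.List.pyRange (max 1 ((nn : Int) - 29)) (nn : Int) 1).foldl
      (fun b k => max b (sockD (nn : Int) - sockD k)) 0 = Dn nn - mn nn := by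
  have hub : ∀ k ∈ PySem.List.pyRange (max 1 ((nn : Int) - 29)) (nn : Int) 1,
      sockD (nn : Int) - sockD k ≤ Dn nn - mn nn := by
    intro k hkmem
    have hb := (PySem.List.mem_pyRange_one).mp hkmem
    have hkc : k = ((k.toNat : Nat) : Int) := by omega
    have h1 : sockD (nn : Int) = Dn nn := by rw [sockD_eq, En_cast]
    have h2 : sockD k = Dn k.toNat := by
      conv_lhs => rw [hkc]
      rw [sockD_eq, En_cast]
    have h3 : mn nn ≤ Dn k.toNat := mn_le nn k.toNat (by omega)
    omega
  have hge : Dn nn - mn nn ≤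
      (PySem.List.pyRange (max 1 ((nn : Int) - 29)) (nn : Int) 1).foldl
        (fun b k => max b (sockD (nn : Int) - sockD k)) 0 := by
    obtain ⟨k0, hkL, hkU, he⟩ := mn_attained_window nn hn
    rcases Nat.lt_or_ge k0 nn with hlt | hge'
    · have hmem : ((k0 : Nat) : Int) ∈
          PySem.List.pyRange (max 1 ((nn : Int) - 29)) (nn : Int) 1 := by
        rw [PySem.List.mem_pyRange_one]
        constructor <;> omega
      have hterm := le_foldl_max_mem (fun k => sockD (nn : Int) - sockD k) _ _ hmem 0
      have h1 : sockD (nn : Int) = Dn nn := by rw [sockD_eq, En_cast]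
      have h2 : sockD ((k0 : Nat) : Int) = Dn k0 := by rw [sockD_eq, En_cast]
      simp only at hterm
      omega
    · -- the min is attained at k0 = nn itself, so the target is 0 ≤ fold
      have hk0 : k0 = nn := by omega
      rw [hk0] at he
      have hinit := le_foldl_max_init (fun k => sockD (nn : Int) - sockD k)
        (PySem.List.pyRange (max 1 ((nn : Int) - 29)) (nn : Int) 1) 0
      omega
  have hle := foldl_max_le_of (fun k => sockD (nn : Int) - sockD k) (Dn nn - mn nn)
    (PySem.List.pyRange (max 1 ((nn : Int) - 29)) (nn : Int) 1) 0
    (by have := mn_le nn nn (le_refl _); omega) hub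
  simp only at hle
  omega

-- A's loop is the clamped walk
lemma loopA_eq (s0 : Int) (m : Nat) :
    (PySem.List.pyRange 1 ((m : Int) + 1) 1).foldl sockStepA s0 = Wk s0 m := by
  induction m with
  | zero => simp [PySem.List.pyRange_one_eq_nil, Wk]
  | succ j ih =>
    have hc : ((j + 1 : Nat) : Int) + 1 = ((j : Int) + 1) + 1 := by push_cast; ring
    rw [hc, PySem.List.pyRange_one_succ_right (by omega), List.foldl_append]
    simp only [List.foldl_cons, List.foldl_nil]
    rw [ih, stepA_eq, Wk]

-- ===== VERDICT (by name: the statement is the Claim_ definition above) =====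
theorem sock_pairs_spec : Claim_equal_sock_pairs := by
  intro pairs cycles _
  unfold Spec_sock_pairs
  simp only [sock_pairs, sock_pairs_alt]
  by_cases hc : cycles ≤ 0
  · rw [if_pos hc, PySem.List.pyRange_one_eq_nil (by omega)]
    rfl
  · rw [if_neg hc]
    have hcast : cycles = ((cycles.toNat : Nat) : Int) := by omega
    have h1 : 1 ≤ cycles.toNat := by omega
    rw [hcast, loopA_eq (2 * pairs) cycles.toNat, best_eq cycles.toNat h1]
    obtain ⟨j, hj⟩ : ∃ j, cycles.toNat = j + 1 := ⟨cycles.toNat - 1, by omega⟩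
    have hD : sockD ((cycles.toNat : Nat) : Int) = Dn cycles.toNat := by rw [sockD_eq, En_cast]
    rw [hD, hj, Wk_eq, Mx_eq]
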